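-- pv_equiv track=rewrite | github.com/smallcloudai/refact | python_binding_and_cmdline/refact/cmdline_printing.py | split_newline_tokens
-- ===== SOURCE A (Python) =====
-- from typing import Optional, List, Tuple
--
-- Tokens = List[Tuple[str, str]]
--
-- def split_newline_tokens(tokens: Tokens) -> Tokens:
--     result = []
--     for token in tokens:
--         first = True
--         for line in token[1].split("\n"):
--             if not first:
--                 result.append((token[0], "\n"))
--             result.append((token[0], line))
--             if first:
--                 first = False
--     return result
-- ===== SOURCE B (Python) =====
-- from typing import List, Tuple
--
-- Tokens = List[Tuple[str, str]]
--
-- def split_newline_tokens(tokens: Tokens) -> Tokens: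
--     result = []
--     for label, text in tokens:
--         seg = []
--         for ch in text:
--             if ch == "\n":
--                 result.append((label, "".join(seg)))
--                 result.append((label, "\n"))
--                 seg = []
--             else:
--                 seg.append(ch)
--         result.append((label, "".join(seg)))
--     return result
-- ===== Notes on version B (the rewrite author's own statement) =====
-- stated objective: alternative
-- what changed: B replaces A's per-token split("\n") into an intermediate list plus a first-iteration flag with a single character scan per token that accumulates the current segment and emits it (followed by a "\n" token) whenever a newline is met.
import Mathlib
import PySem

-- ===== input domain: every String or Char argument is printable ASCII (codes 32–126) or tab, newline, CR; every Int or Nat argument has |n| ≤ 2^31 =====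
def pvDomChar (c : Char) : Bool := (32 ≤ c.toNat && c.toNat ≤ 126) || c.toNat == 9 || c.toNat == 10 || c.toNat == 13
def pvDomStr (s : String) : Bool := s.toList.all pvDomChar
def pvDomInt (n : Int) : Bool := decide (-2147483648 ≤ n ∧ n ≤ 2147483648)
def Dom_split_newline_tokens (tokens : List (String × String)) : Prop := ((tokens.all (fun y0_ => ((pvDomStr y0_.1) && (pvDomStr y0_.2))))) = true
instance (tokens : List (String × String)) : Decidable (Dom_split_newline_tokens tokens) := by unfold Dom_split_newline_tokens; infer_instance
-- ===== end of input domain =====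

-- B replaces split("\n")-plus-first-flag with a single character scan per token
-- that emits segments and newline tokens directly (objective: alternative).

-- ===== PORT A =====
-- for token in tokens: first = True; for line in token[1].split("\n"): …
def split_newline_tokens (tokens : List (String × String)) : List (String × String) :=
  tokens.foldl (fun result token =>
    ((PySem.Chars.splitOn token.2.toList ['\n']).foldl
      (fun (p : List (String × String) × Bool) line =>
        let r := if p.2 = false then p.1 ++ [(token.1, "\n")] else p.1
        (r ++ [(token.1, String.ofList line)], false))
      (result, true)).1) []

-- ===== PORT B =====
-- inner char loop of Source B: seg accumulates the current segment, '\n' flushes it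
def altGo (label : String) : List Char → List Char → List (String × String)
  | [], seg => [(label, String.ofList seg)]
  | c :: rest, seg =>
      if c = '\n' then (label, String.ofList seg) :: (label, "\n") :: altGo label rest []
      else altGo label rest (seg ++ [c])

def split_newline_tokens_alt (tokens : List (String × String)) : List (String × String) :=
  tokens.foldl (fun result t => result ++ altGo t.1 t.2.toList []) []

-- ===== PRECONDITION & SPEC =====
def Spec_split_newline_tokens (tokens : List (String × String)) (out : List (String × String)) : Prop := out = split_newline_tokens_alt tokens
instance (tokens : List (String × String)) (out : List (String × String)) : Decidable (Spec_split_newline_tokens tokens out) := by unfold Spec_split_newline_tokens; infer_instance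

-- ===== CLAIM (what is proved, stated in full; the proofs are below) =====
def Claim_equal_split_newline_tokens : Prop := ∀ (tokens : List (String × String)), Dom_split_newline_tokens tokens → Spec_split_newline_tokens tokens (split_newline_tokens tokens)

-- ===== LEMMAS AND PROOFS =====

-- proof-side recursive characterization of splitOn on separator ['\n']
def mySplit : List Char → List Char → List (List Char)
  | [], cur => [cur]
  | c :: rest, cur =>
      if c = '\n' then cur :: mySplit rest [] else mySplit rest (cur ++ [c])

theorem go_eq (fuel : Nat) (l cur : List Char) (acc : List (List Char))
    (h : l.length < fuel) :
    PySem.Chars.splitOn.go ['\n'] fuel l cur acc = acc.reverse ++ mySplit l cur.reverse := by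
  induction fuel generalizing l cur acc with
  | zero => omega
  | succ n ih =>
    cases l with
    | nil => simp [PySem.Chars.splitOn.go, mySplit]
    | cons c rest =>
      simp only [PySem.Chars.splitOn.go, List.isPrefixOf, List.length_cons] at *
      by_cases hc : c = '\n'
      · simp [hc, ih rest [] (cur.reverse :: acc) (by omega), mySplit]
      · have : ('\n' == c) = false := by simp [BEq.beq]; exact fun h => hc h.symm
        simp [this, ih rest (c :: cur) acc (by omega), mySplit, hc]

theorem splitOn_eq (cs : List Char) :
    PySem.Chars.splitOn cs ['\n'] = mySplit cs [] := by
  simpa using go_eq (cs.length + 1) cs [] [] (by omega)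

-- the A-side inner fold in the not-first state = "\n" then altGo
theorem foldA_false (label : String) (cs seg : List Char) (res : List (String × String)) :
    ((mySplit cs seg).foldl
      (fun (p : List (String × String) × Bool) line =>
        let r := if p.2 = false then p.1 ++ [(label, "\n")] else p.1
        (r ++ [(label, String.ofList line)], false))
      (res, false)).1 = res ++ (label, "\n") :: altGo label cs seg := by
  induction cs generalizing seg res with
  | nil => simp [mySplit, altGo]
  | cons c rest ih =>
    by_cases hc : c = '\n'
    · simp [mySplit, altGo, hc, ih [] (res ++ [(label, "\n"), (label, String.ofList seg)])]
    · simp [mySplit, altGo, hc, ih (seg ++ [c]) res]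

-- the A-side inner fold starting in the first state = altGo
theorem foldA_true (label : String) (cs seg : List Char) (res : List (String × String)) :
    ((mySplit cs seg).foldl
      (fun (p : List (String × String) × Bool) line =>
        let r := if p.2 = false then p.1 ++ [(label, "\n")] else p.1
        (r ++ [(label, String.ofList line)], false))
      (res, true)).1 = res ++ altGo label cs seg := by
  induction cs generalizing seg res with
  | nil => simp [mySplit, altGo]
  | cons c rest ih =>
    by_cases hc : c = '\n'
    · simp [mySplit, altGo, hc, foldA_false label rest [] (res ++ [(label, String.ofList seg)])]
    · simp [mySplit, altGo, hc, ih (seg ++ [c]) res]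

theorem outer_eq (tokens : List (String × String)) (res : List (String × String)) :
    tokens.foldl (fun result token =>
      ((PySem.Chars.splitOn token.2.toList ['\n']).foldl
        (fun (p : List (String × String) × Bool) line =>
          let r := if p.2 = false then p.1 ++ [(token.1, "\n")] else p.1
          (r ++ [(token.1, String.ofList line)], false))
        (result, true)).1) res
    = tokens.foldl (fun result t => result ++ altGo t.1 t.2.toList []) res := by
  induction tokens generalizing res with
  | nil => rfl
  | cons t ts _ =>
    simp only [List.foldl_cons, splitOn_eq, foldA_true]

-- ===== VERDICT (by name: the statement is the Claim_ definition above) =====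
theorem split_newline_tokens_spec : Claim_equal_split_newline_tokens := by
  intro tokens _
  unfold Spec_split_newline_tokens split_newline_tokens split_newline_tokens_alt
  exact outer_eq tokens []
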